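-- pv_equiv track=rewrite | github.com/Wasapon7763/cross_ai_gobang | user_ai/yota.py | fourinrow
-- ===== SOURCE A (Python) =====
-- def fourinrow(l):
--     ans = [0,1,1,1,1,0]
--     length=len(l)
--     num=0
--     if(length>=6):
--         for i in range(length-5):
--             if(ans==l[i:i+6:1]):
--                 num+=1
--     return num
-- ===== SOURCE B (Python) =====
-- def fourinrow(l):
--     num = 0
--     run = 0          # length of current run of 1s
--     prev_zero = False  # was the element just before the run a 0?
--     for x in l:
--         if x == 1:
--             run += 1
--         elif x == 0:
--             if run == 4 and prev_zero:
--                 num += 1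
--             run = 0
--             prev_zero = True
--         else:
--             run = 0
--             prev_zero = False
--     return num
-- ===== Notes on version B (the rewrite author's own statement) =====
-- stated objective: faster
-- what changed: Replaced the sliding-window loop that builds and compares a fresh 6-element slice at every index with a single left-to-right streaming pass that maintains a run length of consecutive 1s and a flag for a preceding 0, counting a match when a 0 closes a run of exactly four 1s that was opened by a 0.
import Mathlib
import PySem

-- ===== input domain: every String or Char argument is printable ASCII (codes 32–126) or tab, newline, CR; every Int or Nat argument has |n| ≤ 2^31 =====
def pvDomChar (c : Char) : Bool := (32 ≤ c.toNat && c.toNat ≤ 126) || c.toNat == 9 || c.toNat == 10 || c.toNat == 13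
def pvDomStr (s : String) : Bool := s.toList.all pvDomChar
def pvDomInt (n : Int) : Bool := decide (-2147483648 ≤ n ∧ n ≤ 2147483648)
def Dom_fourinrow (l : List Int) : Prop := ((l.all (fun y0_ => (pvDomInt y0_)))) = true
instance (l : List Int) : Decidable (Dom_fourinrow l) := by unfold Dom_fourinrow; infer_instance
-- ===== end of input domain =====

-- B replaces A's per-index 6-element slice comparison with a one-pass run-length scan (objective: faster, constant factor).

-- ===== PORT A =====
def fourinrow (l : List Int) : Int :=
  let ans : List Int := [0, 1, 1, 1, 1, 0]
  let length : Int := (l.length : Int)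
  let num : Int := 0
  if length ≥ 6 then
    (PySem.List.pyRange 0 (length - 5) 1).foldl
      (fun num i =>
        if ans = PySem.List.slice l (some i) (some (i + 6)) then num + 1 else num)
      num
  else num

-- ===== PORT B =====
def fourinrow_alt (l : List Int) : Int :=
  (l.foldl
    (fun (st : Int × Int × Bool) x =>
      let num := st.1
      let run := st.2.1
      let prev_zero := st.2.2
      if x = 1 then (num, run + 1, prev_zero)
      else if x = 0 then
        ((if run = 4 ∧ prev_zero = true then num + 1 else num), 0, true)
      else (num, 0, false))
    (0, 0, false)).1

-- ===== PRECONDITION & SPEC =====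
def Spec_fourinrow (l : List Int) (out : Int) : Prop := out = fourinrow_alt l
instance (l : List Int) (out : Int) : Decidable (Spec_fourinrow l out) := by unfold Spec_fourinrow; infer_instance

-- ===== CLAIM (what is proved, stated in full; the proofs are below) =====
def Claim_equal_fourinrow : Prop := ∀ (l : List Int), Dom_fourinrow l → Spec_fourinrow l (fourinrow l)

-- ===== LEMMAS AND PROOFS =====

-- the window pattern A compares against
def pvPat : List Int := [0, 1, 1, 1, 1, 0]

-- cnt l = number of suffix positions of l at which the pattern occurs
def pvCnt : List Int → Int
  | [] => 0
  | x :: xs => (if pvPat = (x :: xs).take 6 then 1 else 0) + pvCnt xs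

lemma pvCnt_cons_def (x : Int) (xs : List Int) :
    pvCnt (x :: xs) = (if pvPat = (x :: xs).take 6 then 1 else 0) + pvCnt xs := rfl

lemma pvCnt_cons_ne (x : Int) (xs : List Int) (hx : x ≠ 0) :
    pvCnt (x :: xs) = pvCnt xs := by
  have h : ¬ (pvPat = (x :: xs).take 6) := by
    intro h
    simp [pvPat, List.take_succ_cons] at h
    exact hx h.1.symm
  rw [pvCnt_cons_def, if_neg h, zero_add]

lemma pvCnt_rep (n : Nat) (t : List Int) :
    pvCnt (List.replicate n 1 ++ t) = pvCnt t := by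
  induction n with
  | zero => simp
  | succ n ih =>
      rw [List.replicate_succ, List.cons_append, pvCnt_cons_ne _ _ (by norm_num)]
      exact ih

-- the state list encoded by (run, prev_zero)
def pvS (run : Nat) (pz : Bool) : List Int :=
  (if pz then [0] else []) ++ List.replicate run 1

lemma pvTake6_pat_iff (run : Nat) (t : List Int) :
    (pvPat = (0 :: (List.replicate run 1 ++ 0 :: t)).take 6) ↔ run = 4 := by
  rcases run with _ | _ | _ | _ | _ | n <;>
    simp [pvPat, List.replicate_succ, List.take_succ_cons]

lemma pvTake6_not (run : Nat) (x : Int) (t : List Int) (hx0 : x ≠ 0) (hx1 : x ≠ 1) :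
    ¬ (pvPat = (0 :: (List.replicate run 1 ++ x :: t)).take 6) := by
  have hx0' : ¬ ((0 : Int) = x) := fun h => hx0 h.symm
  have hx1' : ¬ ((1 : Int) = x) := fun h => hx1 h.symm
  rcases run with _ | _ | _ | _ | _ | n <;>
    simp [pvPat, List.replicate_succ, List.take_succ_cons, hx0', hx1']

lemma pvCnt_S_nil (run : Nat) (pz : Bool) : pvCnt (pvS run pz) = 0 := by
  cases pz with
  | false =>
      simpa [pvS] using pvCnt_rep run ([] : List Int)
  | true =>
      have hrep : pvCnt (List.replicate run 1) = 0 := by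
        simpa using pvCnt_rep run ([] : List Int)
      have hind : ¬ (pvPat = ((0 : Int) :: List.replicate run 1).take 6) := by
        rcases run with _ | _ | _ | _ | _ | n <;>
          simp [pvPat, List.replicate_succ, List.take_succ_cons]
      show pvCnt ((0 : Int) :: List.replicate run 1) = 0
      rw [pvCnt_cons_def, if_neg hind, hrep]
      norm_num

lemma pvCnt_S_zero (run : Nat) (pz : Bool) (t : List Int) :
    pvCnt (pvS run pz ++ 0 :: t)
      = (if run = 4 ∧ pz = true then 1 else 0) + pvCnt (0 :: t) := by
  cases pz with
  | false => simp [pvS, pvCnt_rep]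
  | true =>
      have h := pvTake6_pat_iff run t
      show pvCnt ((0 : Int) :: (List.replicate run 1 ++ 0 :: t)) = _
      rw [pvCnt_cons_def, pvCnt_rep]
      by_cases h4 : run = 4
      · rw [if_pos (h.mpr h4), if_pos (by simp [h4])]
      · rw [if_neg (fun hh => h4 (h.mp hh)), if_neg (by simp [h4])]

lemma pvCnt_S_other (run : Nat) (pz : Bool) (t : List Int) (x : Int)
    (hx0 : x ≠ 0) (hx1 : x ≠ 1) :
    pvCnt (pvS run pz ++ x :: t) = pvCnt t := by
  cases pz with
  | false => simp [pvS, pvCnt_rep, pvCnt_cons_ne x t hx0]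
  | true =>
      have hind := pvTake6_not run x t hx0 hx1
      show pvCnt ((0 : Int) :: (List.replicate run 1 ++ x :: t)) = _
      rw [pvCnt_cons_def, if_neg hind, pvCnt_rep, pvCnt_cons_ne x t hx0, zero_add]

-- B's step function (exactly the lambda in fourinrow_alt)
def pvStepB (st : Int × Int × Bool) (x : Int) : Int × Int × Bool :=
  let num := st.1
  let run := st.2.1
  let prev_zero := st.2.2
  if x = 1 then (num, run + 1, prev_zero)
  else if x = 0 then
    ((if run = 4 ∧ prev_zero = true then num + 1 else num), 0, true)
  else (num, 0, false)

lemma pvAlt_eq_foldl (l : List Int) :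
    fourinrow_alt l = (l.foldl pvStepB (0, 0, false)).1 := rfl

lemma pvInv : ∀ (l : List Int) (num : Int) (run : Nat) (pz : Bool),
    (l.foldl pvStepB (num, (run : Int), pz)).1 = num + pvCnt (pvS run pz ++ l) := by
  intro l
  induction l with
  | nil =>
      intro num run pz
      simp [pvCnt_S_nil]
  | cons x t ih =>
      intro num run pz
      by_cases hx1 : x = 1
      · subst hx1
        have hcast : ((run : Int) + 1) = ((run + 1 : Nat) : Int) := by push_cast; ring
        have hlist : pvS run pz ++ 1 :: t = pvS (run + 1) pz ++ t := by
          simp [pvS, List.replicate_succ' (n := run), List.append_assoc]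
        rw [List.foldl_cons, show pvStepB (num, (run : Int), pz) 1
              = (num, (run : Int) + 1, pz) by simp [pvStepB], hcast, ih, hlist]
      · by_cases hx0 : x = 0
        · subst hx0
          have hrun : ((run : Int) = 4) ↔ (run = 4) := by omega
          have hih := ih ((if (run : Int) = 4 ∧ pz = true then num + 1 else num)) 0 true
          simp only [Nat.cast_zero] at hih
          rw [List.foldl_cons,
            show pvStepB (num, (run : Int), pz) 0
              = ((if (run : Int) = 4 ∧ pz = true then num + 1 else num), 0, true) by
                simp [pvStepB], hih]
          rw [pvCnt_S_zero run pz t,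
            show pvS 0 true ++ t = 0 :: t by simp [pvS]]
          by_cases h4 : run = 4 <;> by_cases hpz : pz = true <;>
            first
              | (simp [h4, hpz, hrun]; ring)
              | simp [h4, hpz, hrun]
        · have hih := ih num 0 false
          simp only [Nat.cast_zero] at hih
          rw [List.foldl_cons,
            show pvStepB (num, (run : Int), pz) x = (num, 0, false) by
              simp [pvStepB, hx0, hx1], hih,
            show pvS 0 false ++ t = t by simp [pvS],
            pvCnt_S_other run pz t x hx0 hx1]

lemma pvAlt_eq_cnt (l : List Int) : fourinrow_alt l = pvCnt l := by
  rw [pvAlt_eq_foldl]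
  have h0 : ((0 : Int)) = ((0 : Nat) : Int) := rfl
  have := pvInv l 0 0 false
  simpa [pvS] using this

-- ===== A side =====

lemma pvIndFalse (l : List Int) (k : Nat) (h : l.length ≤ k + 5) :
    ¬ (pvPat = (l.drop k).take 6) := by
  intro he
  have hl := congrArg List.length he
  simp [pvPat] at hl
  omega

lemma pvFoldlRangeLen (l : List Int) : ∀ c : Int,
    (List.range l.length).foldl
      (fun n k => if pvPat = (l.drop k).take 6 then n + 1 else n) c
      = c + pvCnt l := by
  induction l with
  | nil => intro c; simp [pvCnt]
  | cons x xs ih =>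
      intro c
      rw [show (x :: xs).length = xs.length + 1 from rfl, List.range_succ_eq_map,
        List.foldl_cons, List.foldl_map]
      simp only [List.drop_succ_cons, List.drop_zero]
      refine Eq.trans (ih (if pvPat = (x :: xs).take 6 then c + 1 else c)) ?_
      rw [pvCnt_cons_def]
      split_ifs <;> ring

lemma pvFoldlNoop (l : List Int) (xs : List Nat) :
    ∀ c : Int, (∀ k ∈ xs, l.length ≤ k + 5) →
    xs.foldl (fun n k => if pvPat = (l.drop k).take 6 then n + 1 else n) c = c := by
  induction xs with
  | nil => intro c _; rfl
  | cons a t ih =>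
      intro c h
      rw [List.foldl_cons, if_neg (pvIndFalse l a (h a (List.mem_cons_self)))]
      exact ih c (fun k hk => h k (List.mem_cons_of_mem a hk))

lemma pvSliceSix (l : List Int) (k : Nat) :
    PySem.List.slice l (some (k : Int)) (some ((k : Int) + 6)) = (l.drop k).take 6 := by
  have h := PySem.List.slice_natCast_add (xs := l) (j := k) (n := 6)
  simpa using h

lemma pvA_eq_cnt (l : List Int) : fourinrow l = pvCnt l := by
  by_cases hlen : ((l.length : Int) ≥ 6)
  · have h6 : 6 ≤ l.length := by exact_mod_cast hlen
    set m : Nat := l.length - 5 with hm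
    have hmlen : l.length = m + 5 := by omega
    have hrange : PySem.List.pyRange 0 ((l.length : Int) - 5) 1
        = (List.range m).map (fun (k : Nat) => (k : Int)) := by
      rw [PySem.List.pyRange_one,
        show (((l.length : Int) - 5) - 0).toNat = m by omega]
      exact List.map_congr_left (fun k _ => zero_add ((k : Int)))
    have hport : fourinrow l
        = (List.range m).foldl
            (fun n k => if pvPat = (l.drop k).take 6 then n + 1 else n) 0 := by
      show (if ((l.length : Int)) ≥ 6 then
          (PySem.List.pyRange 0 ((l.length : Int) - 5) 1).foldl
            (fun num i =>
              if pvPat = PySem.List.slice l (some i) (some (i + 6)) then num + 1 else num) 0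
        else 0) = _
      rw [if_pos hlen, hrange, List.foldl_map]
      refine List.foldl_ext _ _ 0 ?_
      intro n k _
      rw [pvSliceSix l k]
    have hfull := pvFoldlRangeLen l 0
    rw [hmlen, List.range_add, List.foldl_append] at hfull
    rw [pvFoldlNoop l ((List.range 5).map (m + ·)) _ ?side] at hfull
    · rw [hport]
      omega
    · intro k hk
      simp at hk
      obtain ⟨j, hj, rfl⟩ := hk
      omega
  · have hshort : l.length ≤ 5 := by omega
    have h0 : fourinrow l = 0 := by
      show (if ((l.length : Int)) ≥ 6 then
          (PySem.List.pyRange 0 ((l.length : Int) - 5) 1).foldl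
            (fun num i =>
              if pvPat = PySem.List.slice l (some i) (some (i + 6)) then num + 1 else num) 0
        else 0) = 0
      rw [if_neg hlen]
    have := pvFoldlRangeLen l 0
    rw [pvFoldlNoop l (List.range l.length) 0 (by intro k _; omega)] at this
    omega

-- ===== VERDICT (by name: the statement is the Claim_ definition above) =====
theorem fourinrow_spec : Claim_equal_fourinrow := by
  intro l _
  unfold Spec_fourinrow
  rw [pvA_eq_cnt, pvAlt_eq_cnt]
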